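-- pv_equiv track=rewrite | github.com/materialsproject/pymatgen | src/pymatgen/io/jdftx/jelstep.py | _gather_JElSteps_line_collections
-- ===== SOURCE A (Python) =====
-- def _gather_JElSteps_line_collections(opt_type: str, text_slice: list[str]) -> tuple[list[list[str]], list[str]]:
--     """Gather line collections for JElSteps initialization.
--
--     Gathers list of line lists where each line list initializes a JElStep object,
--     and the remaining lines that do not initialize a JElStep object are used
--     for initialization unique to the JElSteps object.
--
--     Args:
--         opt_type (str): The type of electronic minimization step.
--         text_slice (list[str]): A slice of text from a JDFTx out file corresponding to a series of SCF steps.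
--
--     Returns:
--         tuple: A tuple containing:
--             line_collections (list[list[str]]): A list of lists of lines of text from a JDFTx out file
--             corresponding to a single SCF step.
--             lines_collect (list[str]): A list of lines of text from a JDFTx out file corresponding to a single SCF step.
--     """
--     lines_collect = []
--     line_collections = []
--     _iter_flag = f"{opt_type}: Iter:"
--     for line_text in text_slice:
--         if len(line_text.strip()):
--             lines_collect.append(line_text)
--             if _iter_flag in line_text:
--                 line_collections.append(lines_collect)
--                 lines_collect = []
--         else:
--             break
--     return line_collections, lines_collect
-- ===== SOURCE B (Python) =====
-- def _gather_JElSteps_line_collections(opt_type: str, text_slice: list[str]) -> tuple[list[list[str]], list[str]]: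
--     """Index-table decomposition: valid prefix up to first blank line, then slice at flag lines."""
--     _iter_flag = f"{opt_type}: Iter:"
--     cut = len(text_slice)
--     for i, line_text in enumerate(text_slice):
--         if not line_text.strip():
--             cut = i
--             break
--     prefix = text_slice[:cut]
--     flag_idxs = [i for i, line_text in enumerate(prefix) if _iter_flag in line_text]
--     starts = [0] + [i + 1 for i in flag_idxs]
--     line_collections = [prefix[s:e + 1] for s, e in zip(starts, flag_idxs)]
--     return line_collections, prefix[starts[-1]:]
-- ===== Notes on version B (the rewrite author's own statement) =====
-- stated objective: alternative
-- what changed: Replaced A's stateful accumulate-and-reset loop by an index-table decomposition: compute the blank-line cut, list the flag-line indices, then slice the prefix at consecutive boundaries.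
import Mathlib
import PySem

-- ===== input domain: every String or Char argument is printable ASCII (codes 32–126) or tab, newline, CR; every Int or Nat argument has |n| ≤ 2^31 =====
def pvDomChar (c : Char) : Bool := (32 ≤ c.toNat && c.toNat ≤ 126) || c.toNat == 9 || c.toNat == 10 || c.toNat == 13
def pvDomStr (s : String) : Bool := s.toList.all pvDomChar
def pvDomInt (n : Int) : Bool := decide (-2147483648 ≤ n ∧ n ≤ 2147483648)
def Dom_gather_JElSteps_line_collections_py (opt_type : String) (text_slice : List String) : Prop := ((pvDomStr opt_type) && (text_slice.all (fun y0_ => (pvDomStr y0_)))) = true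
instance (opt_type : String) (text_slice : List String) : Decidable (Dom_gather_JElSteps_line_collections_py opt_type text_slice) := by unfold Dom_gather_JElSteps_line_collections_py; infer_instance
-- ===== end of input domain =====

-- B replaces A's stateful accumulate-and-reset loop by an index-table decomposition
-- (blank-line cut, flag-index list, slicing); objective: alternative decomposition, same cost.

-- ===== PORT A =====
-- the for-loop of A with its two accumulators (break on a blank line)
def pvGoA (flag : String) : List String → List String → List (List String) → List (List String) × List String
  | [], lines_collect, line_collections => (line_collections, lines_collect)
  | l :: rest, lines_collect, line_collections =>
    if PySem.Str.len (PySem.Str.strip l) ≠ 0 then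
      let lines_collect' := lines_collect ++ [l]
      if PySem.Str.isIn flag l then
        pvGoA flag rest [] (line_collections ++ [lines_collect'])
      else
        pvGoA flag rest lines_collect' line_collections
    else (line_collections, lines_collect)

def gather_JElSteps_line_collections_py (opt_type : String) (text_slice : List String) : List (List String) × List String :=
  pvGoA (opt_type ++ ": Iter:") text_slice [] []

-- ===== PORT B =====
-- the cut-finding loop of B: index of the first whitespace-only line, else the length
def pvCutB : List String → Nat
  | [] => 0
  | l :: rest => if PySem.Str.len (PySem.Str.strip l) = 0 then 0 else pvCutB rest + 1

def gather_JElSteps_line_collections_py_alt (opt_type : String) (text_slice : List String) : List (List String) × List String :=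
  let iter_flag := opt_type ++ ": Iter:"
  let cut : Int := (pvCutB text_slice : Int)
  let pfx := PySem.List.slice text_slice none (some cut)
  let flag_idxs : List Int :=
    ((PySem.List.enumerate pfx 0).filter (fun q => PySem.Str.isIn iter_flag q.2)).map (·.1)
  let starts : List Int := 0 :: flag_idxs.map (· + 1)
  let line_collections :=
    (starts.zip flag_idxs).map (fun q => PySem.List.slice pfx (some q.1) (some (q.2 + 1)))
  (line_collections, PySem.List.slice pfx (some (PySem.List.pyGetD starts (-1) 0)) none)

-- ===== PRECONDITION & SPEC =====
def Spec_gather_JElSteps_line_collections_py (opt_type : String) (text_slice : List String) (out : List (List String) × List String) : Prop := out = gather_JElSteps_line_collections_py_alt opt_type text_slice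
instance (opt_type : String) (text_slice : List String) (out : List (List String) × List String) : Decidable (Spec_gather_JElSteps_line_collections_py opt_type text_slice out) := by unfold Spec_gather_JElSteps_line_collections_py; infer_instance

-- ===== CLAIM (what is proved, stated in full; the proofs are below) =====
def Claim_equal_gather_JElSteps_line_collections_py : Prop := ∀ (opt_type : String) (text_slice : List String), Dom_gather_JElSteps_line_collections_py opt_type text_slice → Spec_gather_JElSteps_line_collections_py opt_type text_slice (gather_JElSteps_line_collections_py opt_type text_slice)

-- ===== LEMMAS AND PROOFS =====

-- reference function: grouping with no accumulators
def pvSplit (flag : String) : List String → List (List String) × List String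
  | [] => ([], [])
  | l :: rest =>
    if PySem.Str.isIn flag l then
      ([l] :: (pvSplit flag rest).1, (pvSplit flag rest).2)
    else
      match pvSplit flag rest with
      | ([], r) => ([], l :: r)
      | (g :: gs, r) => ((l :: g) :: gs, r)

-- prepend an accumulated partial group in front of a pvSplit result
def pvGraft (collect : List String) : List (List String) × List String → List (List String) × List String
  | ([], r) => ([], collect ++ r)
  | (g :: gs, r) => ((collect ++ g) :: gs, r)

theorem pvGraft_nil (res : List (List String) × List String) : pvGraft [] res = res := by
  rcases res with ⟨c, r⟩; cases c <;> simp [pvGraft]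

theorem pvGoA_eq_graft (flag : String) (lines : List String) :
    ∀ (collect : List String) (colls : List (List String)),
      pvGoA flag lines collect colls =
        ((colls ++ (pvGraft collect (pvSplit flag (lines.take (pvCutB lines)))).1),
          (pvGraft collect (pvSplit flag (lines.take (pvCutB lines)))).2) := by
  induction lines with
  | nil => intro collect colls; simp [pvGoA, pvCutB, pvSplit, pvGraft]
  | cons l rest ih =>
    intro collect colls
    rcases hres : pvSplit flag (rest.take (pvCutB rest)) with ⟨c, r⟩
    by_cases hb : PySem.Chars.strip l.toList = []
    · simp [pvGoA, pvCutB, hb, pvSplit, pvGraft]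
    · by_cases hf : PySem.Chars.isIn flag.toList l.toList = true
      · simp [pvGoA, pvCutB, hb, hf, ih, List.take_succ_cons, pvSplit, hres]
        cases c <;> simp [pvGraft]
      · cases c <;> simp [pvGoA, pvCutB, hb, hf, ih, List.take_succ_cons, pvSplit, hres, pvGraft]

-- A equals pvSplit on the blank-cut prefix
theorem pvA_eq_split (flag : String) (lines : List String) :
    pvGoA flag lines [] [] = pvSplit flag (lines.take (pvCutB lines)) := by
  rw [pvGoA_eq_graft, pvGraft_nil]
  simp

-- Nat-level flag-index table
def pvIdx (flag : String) : List String → List Nat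
  | [] => []
  | l :: rest =>
    if PySem.Str.isIn flag l then 0 :: (pvIdx flag rest).map (· + 1)
    else (pvIdx flag rest).map (· + 1)

-- enumerate-filter-map produces exactly the casts of pvIdx (shifted by the start)
theorem pvEnum_idx (flag : String) (p : List String) : ∀ (k : Nat),
    ((PySem.List.enumerate p (k : Int)).filter (fun q => PySem.Str.isIn flag q.2)).map (·.1)
      = (pvIdx flag p).map (fun j => ((j + k : Nat) : Int)) := by
  induction p with
  | nil => intro k; simp [PySem.List.enumerate_nil, pvIdx]
  | cons l rest ih =>
    intro k
    have h1 : ((k : Int) + 1) = ((k + 1 : Nat) : Int) := by push_cast; ring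
    rw [PySem.List.enumerate_cons, h1]
    by_cases hf : PySem.Str.isIn flag l = true
    · rw [List.filter_cons_of_pos (by simpa using hf)]
      simp only [List.map_cons, ih (k + 1), pvIdx, if_pos hf, List.map_map]
      refine List.cons_eq_cons.2 ⟨by push_cast; ring, ?_⟩
      apply List.map_congr_left
      intro a _
      simp only [Function.comp_apply]
      push_cast; ring
    · rw [List.filter_cons_of_neg (by simpa using hf)]
      simp only [ih (k + 1), pvIdx, if_neg hf, List.map_map]
      apply List.map_congr_left
      intro a _
      simp only [Function.comp_apply]
      push_cast; ring

-- the Nat-level slicing core of B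
def pvSlices (p : List String) (I : List Nat) : List (List String) :=
  (((0 :: I.map (· + 1)).zip I).map (fun q => (p.drop q.1).take (q.2 + 1 - q.1)))

def pvLast (I : List Nat) : Nat := (0 :: I.map (· + 1)).getLastD 0

theorem pvLast_succ_aux (e : Nat) (I2 : List Nat) (x : Nat) (hx : (e :: I2).getLast? = some x) :
    ((e + 1) :: I2.map (· + 1)).getLast? = some (x + 1) := by
  rw [show ((e + 1) :: I2.map (· + 1)) = (e :: I2).map (· + 1) from rfl, List.getLast?_map, hx]
  rfl

theorem pvGetLast_exists {α : Type} (a : α) (xs : List α) : ∃ x, (a :: xs).getLast? = some x := by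
  cases h : (a :: xs).getLast? with
  | none => simp [List.getLast?_eq_none_iff] at h
  | some x => exact ⟨x, rfl⟩

theorem pvLast_eq (I : List Nat) : pvLast I = (I.getLast?.map (· + 1)).getD 0 := by
  rcases I with _ | ⟨e, I2⟩
  · simp [pvLast]
  · obtain ⟨x, hx⟩ := pvGetLast_exists e I2
    simp [pvLast, List.getLastD_eq_getLast?, List.getLast?_cons_cons,
      pvLast_succ_aux e I2 x hx, hx]

theorem pvLast_map_succ (I : List Nat) (hI : I ≠ []) :
    pvLast (I.map (· + 1)) = pvLast I + 1 := by
  rcases I with _ | ⟨e, I2⟩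
  · exact absurd rfl hI
  · obtain ⟨x, hx⟩ := pvGetLast_exists e I2
    simp [pvLast_eq, pvLast_succ_aux e I2 x hx, hx]

theorem pvLast_cons_zero (I : List Nat) : pvLast (0 :: I.map (· + 1)) = pvLast I + 1 := by
  rcases I with _ | ⟨e, I2⟩
  · simp [pvLast_eq]
  · obtain ⟨x, hx⟩ := pvGetLast_exists e I2
    simp [pvLast_eq, List.getLast?_cons_cons, pvLast_succ_aux e I2 x hx, hx]

theorem pvSlices_shift (l : String) (p : List String) (I : List Nat) :
    pvSlices (l :: p) (I.map (· + 1)) = (pvSlices p I).modifyHead (l :: ·) := by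
  rcases I with _ | ⟨e, I'⟩
  · simp [pvSlices]
  · simp only [pvSlices, List.map_cons, List.zip_cons_cons, List.map_cons, List.modifyHead]
    refine List.cons_eq_cons.2 ⟨by simp [List.take_succ_cons], ?_⟩
    rw [show ((e + 1 + 1) :: (I'.map (· + 1)).map (· + 1)) = ((e + 1) :: I'.map (· + 1)).map (· + 1) by simp,
      List.zip_map, List.map_map]
    apply List.map_congr_left
    rintro ⟨s, t⟩ _
    simp only [Function.comp_apply, Prod.map_apply]
    rw [List.drop_succ_cons]
    congr 1
    omega

theorem pvSlices_cons_flag (l : String) (p : List String) (I : List Nat) :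
    pvSlices (l :: p) (0 :: I.map (· + 1)) = [l] :: pvSlices p I := by
  simp only [pvSlices, List.map_cons, List.zip_cons_cons, List.map_cons]
  refine List.cons_eq_cons.2 ⟨by simp, ?_⟩
  rw [show ((0 + 1) :: (I.map (· + 1)).map (· + 1)) = (0 :: I.map (· + 1)).map (· + 1) by simp,
    List.zip_map, List.map_map]
  apply List.map_congr_left
  rintro ⟨s, t⟩ _
  simp only [Function.comp_apply, Prod.map_apply]
  rw [List.drop_succ_cons]
  congr 1
  omega

-- the Nat-level core of B computes pvSplit
theorem pvCore_eq_split (flag : String) (p : List String) :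
    (pvSlices p (pvIdx flag p), p.drop (pvLast (pvIdx flag p))) = pvSplit flag p := by
  induction p with
  | nil => simp [pvSlices, pvIdx, pvLast, pvSplit]
  | cons l rest ih =>
    by_cases hf : PySem.Chars.isIn flag.toList l.toList = true
    · rw [show pvIdx flag (l :: rest) = 0 :: (pvIdx flag rest).map (· + 1) by
        simp [pvIdx, hf]]
      rw [pvSlices_cons_flag, pvLast_cons_zero, List.drop_succ_cons]
      rw [show pvSplit flag (l :: rest)
          = ([l] :: (pvSplit flag rest).1, (pvSplit flag rest).2) by simp [pvSplit, hf]]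
      rw [← ih]
    · rw [show pvIdx flag (l :: rest) = (pvIdx flag rest).map (· + 1) by simp [pvIdx, hf]]
      rw [pvSlices_shift]
      rcases hI : pvIdx flag rest with _ | ⟨e, I'⟩
      · have hsp : pvSplit flag rest = ([], rest) := by
          rw [← ih, hI]; simp [pvSlices, pvLast]
        rw [show pvSplit flag (l :: rest) = ([], l :: rest) by simp [pvSplit, hf, hsp]]
        simp [pvSlices, pvLast]
      · rw [pvLast_map_succ _ (by simp), List.drop_succ_cons]
        have hih := ih
        rw [hI] at hih
        rcases hsp : pvSplit flag rest with ⟨c, r⟩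
        rw [hsp] at hih
        rw [Prod.ext_iff] at hih
        obtain ⟨hc, hr⟩ := hih
        simp only at hc hr
        rcases c with _ | ⟨g, gs⟩
        · exact absurd hc (by simp [pvSlices])
        · rw [hc, hr]
          simp [pvSplit, hf, hsp, List.modifyHead]

-- B's Int-level port equals the Nat-level core
theorem pvAlt_eq_core (opt_type : String) (text_slice : List String) :
    gather_JElSteps_line_collections_py_alt opt_type text_slice =
      (pvSlices (text_slice.take (pvCutB text_slice))
          (pvIdx (opt_type ++ ": Iter:") (text_slice.take (pvCutB text_slice))),
        (text_slice.take (pvCutB text_slice)).drop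
          (pvLast (pvIdx (opt_type ++ ": Iter:") (text_slice.take (pvCutB text_slice))))) := by
  show (let iter_flag := opt_type ++ ": Iter:";
    let cut : Int := (pvCutB text_slice : Int);
    let pfx := PySem.List.slice text_slice none (some cut);
    let flag_idxs : List Int :=
      ((PySem.List.enumerate pfx 0).filter (fun q => PySem.Str.isIn iter_flag q.2)).map (·.1);
    let starts : List Int := 0 :: flag_idxs.map (· + 1);
    let line_collections :=
      (starts.zip flag_idxs).map (fun q => PySem.List.slice pfx (some q.1) (some (q.2 + 1)));
    (line_collections, PySem.List.slice pfx (some (PySem.List.pyGetD starts (-1) 0)) none)) = _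
  simp only
  set flag := opt_type ++ ": Iter:" with hflag
  have hpfx : PySem.List.slice text_slice none (some ((pvCutB text_slice : Nat) : Int))
      = text_slice.take (pvCutB text_slice) := PySem.List.slice_to_natCast text_slice _
  rw [hpfx]
  set p := text_slice.take (pvCutB text_slice) with hp
  set I := pvIdx flag p with hI
  have hidx : ((PySem.List.enumerate p (0 : Int)).filter
        (fun q => PySem.Str.isIn flag q.2)).map (·.1) = I.map (fun j => ((j : Nat) : Int)) := by
    have := pvEnum_idx flag p 0
    simpa using this
  rw [hidx]
  have hstarts : ((0 : Int) :: (I.map (fun j => ((j : Nat) : Int))).map (· + 1))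
      = ((0 :: I.map (· + 1)).map (fun j => ((j : Nat) : Int))) := by
    simp only [List.map_cons, List.map_map, Nat.cast_zero]
    refine List.cons_eq_cons.2 ⟨rfl, List.map_congr_left fun a _ => ?_⟩
    simp only [Function.comp_apply]
    push_cast; ring
  rw [hstarts]
  congr 1
  · -- the collections
    rw [List.zip_map, List.map_map]
    unfold pvSlices
    apply List.map_congr_left
    rintro ⟨s, t⟩ _
    simp only [Function.comp_apply, Prod.map_apply]
    rw [show ((t : Nat) : Int) + 1 = ((t + 1 : Nat) : Int) by push_cast; ring,
      PySem.List.slice_natCast]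
  · -- the tail
    obtain ⟨x, hx⟩ := pvGetLast_exists (0 : Nat) (I.map (· + 1))
    have hpl : pvLast I = x := by
      simp [pvLast, List.getLastD_eq_getLast?, hx]
    have hgd : PySem.List.pyGetD ((0 :: I.map (· + 1)).map (fun j => ((j : Nat) : Int))) (-1) 0
        = ((x : Nat) : Int) := by
      simp only [PySem.List.pyGetD]
      rw [PySem.List.pyGet?_neg_one, List.getLast?_map, hx]
      rfl
    rw [hgd, PySem.List.slice_from_natCast, hpl]

-- ===== VERDICT (by name: the statement is the Claim_ definition above) =====
theorem gather_JElSteps_line_collections_py_spec : Claim_equal_gather_JElSteps_line_collections_py := by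
  intro opt_type text_slice _
  unfold Spec_gather_JElSteps_line_collections_py
  rw [pvAlt_eq_core, pvCore_eq_split]
  exact pvA_eq_split _ _
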